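-- pv_equiv track=rewrite | github.com/pypi-data/pypi-mirror-314 | packages/REMI-z/remi_z-0.5.9.tar.gz/remi_z-0.5.9/remi_z/legacy_tokenizer.py | get_bar_idx_from_remi
-- ===== SOURCE A (Python) =====
-- def get_bar_idx_from_remi(remi_seq):
--     # Get the starting token of each bar
--     start_token_index_of_the_bar = 0
--     bar_id = 0
--     bar_indices = {}
--
--     # bars_token_positions[bar_id] = (start token index of this bar, start token index of next bar)
--     for idx, token in enumerate(remi_seq):
--         if token == 'b-1':
--             start_token_index_of_next_bar = idx + 1
--             bar_indices[bar_id] = (start_token_index_of_the_bar, start_token_index_of_next_bar)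
--
--             # Go to the next bar
--             start_token_index_of_the_bar = start_token_index_of_next_bar
--             bar_id = bar_id + 1
--     return bar_indices
-- ===== SOURCE B (Python) =====
-- def get_bar_idx_from_remi(remi_seq):
--     # Pass 1: boundary positions (start of sequence plus position after each 'b-1')
--     boundaries = [0] + [i + 1 for i, t in enumerate(remi_seq) if t == 'b-1']
--     # Pass 2: pair consecutive boundaries, numbered by bar id
--     return dict(enumerate(zip(boundaries, boundaries[1:])))
-- ===== Notes on version B (the rewrite author's own statement) =====
-- stated objective: simpler
-- what changed: Replaces A's single stateful scan threading a running start index and bar counter through a dict-building loop with two separate passes: collect all boundary positions, then pair consecutive boundaries via zip/enumerate.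
import Mathlib
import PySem

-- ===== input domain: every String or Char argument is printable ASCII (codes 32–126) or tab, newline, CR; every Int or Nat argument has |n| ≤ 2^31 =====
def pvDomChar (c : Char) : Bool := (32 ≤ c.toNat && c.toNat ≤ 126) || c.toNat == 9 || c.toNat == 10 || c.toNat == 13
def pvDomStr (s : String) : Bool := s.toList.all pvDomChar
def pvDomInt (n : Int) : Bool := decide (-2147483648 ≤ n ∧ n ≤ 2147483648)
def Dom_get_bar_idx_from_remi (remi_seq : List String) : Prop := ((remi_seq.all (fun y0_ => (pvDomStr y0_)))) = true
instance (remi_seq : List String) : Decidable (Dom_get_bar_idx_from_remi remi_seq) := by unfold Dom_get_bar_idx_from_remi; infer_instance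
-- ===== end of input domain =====

-- B replaces A's single stateful scan (running start index + bar counter + dict) by two
-- passes: collect boundary positions, then pair consecutive boundaries (objective: simpler).

-- ===== PORT A =====
-- state = (start_token_index_of_the_bar, bar_id, bar_indices)
def get_bar_idx_from_remi (remi_seq : List String) : List (Int × Int × Int) :=
  (((PySem.List.enumerate remi_seq).foldl
      (fun (st : Int × Int × PySem.Dict Int (Int × Int)) p =>
        if p.2 == "b-1" then (p.1 + 1, st.2.1 + 1, st.2.2.insert st.2.1 (st.1, p.1 + 1))
        else st)
      (0, 0, PySem.Dict.empty)).2.2).items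

-- ===== PORT B =====
def get_bar_idx_from_remi_alt (remi_seq : List String) : List (Int × Int × Int) :=
  let boundaries : List Int :=
    0 :: (PySem.List.enumerate remi_seq).filterMap
          (fun p => if p.2 == "b-1" then some (p.1 + 1) else none)
  PySem.List.enumerate (boundaries.zip boundaries.tail)

-- ===== PRECONDITION & SPEC =====
def Spec_get_bar_idx_from_remi (remi_seq : List String) (out : List (Int × Int × Int)) : Prop := out = get_bar_idx_from_remi_alt remi_seq
instance (remi_seq : List String) (out : List (Int × Int × Int)) : Decidable (Spec_get_bar_idx_from_remi remi_seq out) := by unfold Spec_get_bar_idx_from_remi; infer_instance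

-- ===== CLAIM (what is proved, stated in full; the proofs are below) =====
def Claim_equal_get_bar_idx_from_remi : Prop := ∀ (remi_seq : List String), Dom_get_bar_idx_from_remi remi_seq → Spec_get_bar_idx_from_remi remi_seq (get_bar_idx_from_remi remi_seq)

-- ===== LEMMAS AND PROOFS =====

-- abstract "pair consecutive boundaries, numbered from bid, previous boundary = start"
def pvPairUp (bid start : Int) : List Int → List (Int × Int × Int)
  | [] => []
  | e :: rest => (bid, start, e) :: pvPairUp (bid + 1) e rest

lemma pvFoldA_items (xs : List String) : ∀ (s start bid : Int) (d : PySem.Dict Int (Int × Int)),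
    (∀ k ∈ d.keys, k < bid) →
    (((PySem.List.enumerate xs s).foldl
        (fun (st : Int × Int × PySem.Dict Int (Int × Int)) p =>
          if p.2 == "b-1" then (p.1 + 1, st.2.1 + 1, st.2.2.insert st.2.1 (st.1, p.1 + 1))
          else st)
        (start, bid, d)).2.2).items
      = d.items ++ pvPairUp bid start
          ((PySem.List.enumerate xs s).filterMap
            (fun p => if p.2 == "b-1" then some (p.1 + 1) else none)) := by
  induction xs with
  | nil => intro s start bid d h; simp [PySem.List.enumerate_nil, pvPairUp]
  | cons x xs ih =>
    intro s start bid d h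
    rw [PySem.List.enumerate_cons]
    by_cases hx : x = "b-1"
    · have hnc : d.contains bid = false := by
        by_contra hc
        have : bid ∈ d.keys := (PySem.Dict.contains_iff_mem_keys d bid).mp
          (by simpa using hc)
        exact absurd (h bid this) (lt_irrefl bid)
      simp only [List.foldl_cons, List.filterMap_cons, hx, BEq.rfl, if_true]
      rw [ih (s + 1) (s + 1) (bid + 1) (d.insert bid (start, s + 1))
        (by
          intro k hk
          rcases (PySem.Dict.mem_keys_insert d bid k (start, s + 1)).mp hk with h1 | h2
          · omega
          · have := h k h2; omega)]
      rw [PySem.Dict.items_insert_of_not_contains (h := hnc)]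
      simp [pvPairUp]
    · have hne : (x == "b-1") = false := by simpa using hx
      simp only [List.foldl_cons, List.filterMap_cons, hne]
      exact ih (s + 1) start bid d h

lemma pvEnum_zip (bs : List Int) : ∀ (bid start : Int),
    PySem.List.enumerate ((start :: bs).zip bs) bid = pvPairUp bid start bs := by
  induction bs with
  | nil => intro bid start; simp [pvPairUp, PySem.List.enumerate_nil]
  | cons e rest ih =>
    intro bid start
    simp only [List.zip_cons_cons, PySem.List.enumerate_cons, pvPairUp]
    exact congrArg _ (ih (bid + 1) e)

-- ===== VERDICT (by name: the statement is the Claim_ definition above) =====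
theorem get_bar_idx_from_remi_spec : Claim_equal_get_bar_idx_from_remi := by
  intro remi_seq _
  unfold Spec_get_bar_idx_from_remi get_bar_idx_from_remi get_bar_idx_from_remi_alt
  rw [pvFoldA_items remi_seq 0 0 0 PySem.Dict.empty (by simp [PySem.Dict.keys_empty])]
  simp only [List.tail_cons]
  show _ = [] ++ _
  exact (pvEnum_zip _ 0 0).symm
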